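-- pv_equiv track=rewrite | github.com/luff543/Event-Source-Page-Discovery-Justine | src/RepeatPatternTool.py | GetTagAppearTimeAndContent
-- ===== SOURCE A (Python) =====
-- def GetTagAppearTimeAndContent(tagelems):
--     appeartime = {}
--     tagcontentMap = {}
--     for elem in tagelems:
--         if str(elem[0]) in appeartime:
--             appeartime[str(elem[0])] += 1
--             tagcontentMap[str(elem[0])] += elem[1] + ' '
--         else:
--             appeartime[str(elem[0])] = 1
--             tagcontentMap[str(elem[0])] = elem[1] + ' '
--     return appeartime, tagcontentMap
-- ===== SOURCE B (Python) =====
-- def GetTagAppearTimeAndContent(tagelems):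
--     groups = {}
--     for elem in tagelems:
--         groups.setdefault(str(elem[0]), []).append(elem[1])
--     appeartime = {k: len(vs) for k, vs in groups.items()}
--     tagcontentMap = {k: ' '.join(vs) + ' ' for k, vs in groups.items()}
--     return appeartime, tagcontentMap
-- ===== Notes on version B (the rewrite author's own statement) =====
-- stated objective: alternative
-- what changed: Replaces A's single if/else accumulation loop over two dicts by a group-first-then-aggregate decomposition: one pass builds a dict of value lists via setdefault/append, then len() and ' '.join(vs)+' ' comprehensions produce the two result dicts.
import Mathlib
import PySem

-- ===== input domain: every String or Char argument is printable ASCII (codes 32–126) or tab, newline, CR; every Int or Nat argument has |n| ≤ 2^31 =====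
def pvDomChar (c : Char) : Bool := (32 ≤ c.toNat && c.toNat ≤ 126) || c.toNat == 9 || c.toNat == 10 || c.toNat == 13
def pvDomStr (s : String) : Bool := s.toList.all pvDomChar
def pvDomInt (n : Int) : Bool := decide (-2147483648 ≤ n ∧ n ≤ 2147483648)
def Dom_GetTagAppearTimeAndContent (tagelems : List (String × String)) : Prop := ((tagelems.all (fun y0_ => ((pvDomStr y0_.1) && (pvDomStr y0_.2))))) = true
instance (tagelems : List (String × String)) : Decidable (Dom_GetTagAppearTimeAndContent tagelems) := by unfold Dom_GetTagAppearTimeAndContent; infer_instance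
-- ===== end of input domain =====

-- B replaces A's single if/else accumulation loop by group-first-then-aggregate: one grouping
-- pass into a dict of value lists, then len/join comprehensions build the two result dicts
-- (objective: alternative decomposition; same asymptotic cost).

-- ===== PORT A =====
-- Literal port of A: one loop over tagelems updating the two dicts in lockstep; str(elem[0])
-- is the identity here since keys are already strings; 'd[k] += x' is ported as
-- insert k (getD k dflt ++ x), exact because the branch only runs when k is present.
def GetTagAppearTimeAndContent (tagelems : List (String × String)) : (List (String × Int)) × (List (String × String)) :=
  let st :=
    tagelems.foldl
      (fun (st : PySem.Dict String Int × PySem.Dict String String) elem =>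
        if st.1.contains elem.1 then
          (st.1.insert elem.1 (st.1.getD elem.1 0 + 1),
           st.2.insert elem.1 (st.2.getD elem.1 "" ++ (elem.2 ++ " ")))
        else
          (st.1.insert elem.1 1,
           st.2.insert elem.1 (elem.2 ++ " ")))
      (PySem.Dict.empty, PySem.Dict.empty)
  (st.1.items, st.2.items)

-- ===== PORT B =====
-- Port of Source B: 'groups.setdefault(k, []).append(v)' has the net effect
-- groups[k] = groups.get(k, []) + [v], i.e. Dict.modify k [] (· ++ [v]).
def GetTagAppearTimeAndContent_alt (tagelems : List (String × String)) : (List (String × Int)) × (List (String × String)) :=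
  let groups : PySem.Dict String (List String) :=
    tagelems.foldl (fun d elem => d.modify elem.1 [] (fun vs => vs ++ [elem.2])) PySem.Dict.empty
  (groups.items.map (fun kv => (kv.1, (kv.2.length : Int))),
   groups.items.map (fun kv => (kv.1, PySem.Str.join " " kv.2 ++ " ")))

-- ===== PRECONDITION & SPEC =====
def Spec_GetTagAppearTimeAndContent (tagelems : List (String × String)) (out : (List (String × Int)) × (List (String × String))) : Prop := out = GetTagAppearTimeAndContent_alt tagelems
instance (tagelems : List (String × String)) (out : (List (String × Int)) × (List (String × String))) : Decidable (Spec_GetTagAppearTimeAndContent tagelems out) := by unfold Spec_GetTagAppearTimeAndContent; infer_instance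

-- ===== CLAIM (what is proved, stated in full; the proofs are below) =====
def Claim_equal_GetTagAppearTimeAndContent : Prop := ∀ (tagelems : List (String × String)), Dom_GetTagAppearTimeAndContent tagelems → Spec_GetTagAppearTimeAndContent tagelems (GetTagAppearTimeAndContent tagelems)

-- ===== LEMMAS AND PROOFS =====

-- concatenation of a list of string pieces (proof-only helper)
def pvCat : List String → String
  | [] => ""
  | v :: vs => v ++ pvCat vs

-- A's lockstep pair fold splits into two independent membership-free folds (both dicts
-- always carry the same keys, and an absent key's getD gives the neutral default).
lemma pair_fold_split (l : List (String × String)) (a : PySem.Dict String Int) (c : PySem.Dict String String)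
    (h : a.keys = c.keys) :
    l.foldl
      (fun (st : PySem.Dict String Int × PySem.Dict String String) elem =>
        if st.1.contains elem.1 then
          (st.1.insert elem.1 (st.1.getD elem.1 0 + 1),
           st.2.insert elem.1 (st.2.getD elem.1 "" ++ (elem.2 ++ " ")))
        else
          (st.1.insert elem.1 1,
           st.2.insert elem.1 (elem.2 ++ " "))) (a, c)
      = (l.foldl (fun d p => d.insert p.1 (d.getD p.1 0 + 1)) a,
         l.foldl (fun d p => d.insert p.1 (d.getD p.1 "" ++ (p.2 ++ " "))) c) := by
  induction l generalizing a c with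
  | nil => rfl
  | cons p t ih =>
    have hc : a.contains p.1 = c.contains p.1 := by
      rw [PySem.Dict.contains_eq_decide_mem_keys, PySem.Dict.contains_eq_decide_mem_keys, h]
    have hstep :
        (if a.contains p.1 then
          (a.insert p.1 (a.getD p.1 0 + 1), c.insert p.1 (c.getD p.1 "" ++ (p.2 ++ " ")))
         else (a.insert p.1 1, c.insert p.1 (p.2 ++ " ")))
        = (a.insert p.1 (a.getD p.1 0 + 1), c.insert p.1 (c.getD p.1 "" ++ (p.2 ++ " "))) := by
      by_cases hm : a.contains p.1 = true
      · simp [hm]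
      · simp only [Bool.not_eq_true] at hm
        simp [hm, PySem.Dict.getD_of_not_contains a 0 hm,
              PySem.Dict.getD_of_not_contains c "" (hc ▸ hm)]
    have hk : (a.insert p.1 (a.getD p.1 0 + 1)).keys = (c.insert p.1 (c.getD p.1 "" ++ (p.2 ++ " "))).keys := by
      by_cases hm : a.contains p.1 = true
      · rw [PySem.Dict.keys_insert_of_contains _ _ hm,
            PySem.Dict.keys_insert_of_contains _ _ (hc ▸ hm), h]
      · simp only [Bool.not_eq_true] at hm
        rw [PySem.Dict.keys_insert_of_not_contains _ _ hm,
            PySem.Dict.keys_insert_of_not_contains _ _ (hc ▸ hm), h]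
    simp only [List.foldl_cons, hstep]
    exact ih _ _ hk

-- getD characterisation of A's string-accumulation fold
lemma getD_foldl_insert_strcat (l : List (String × String)) (d : PySem.Dict String String) (k : String) :
    (l.foldl (fun d p => d.insert p.1 (d.getD p.1 "" ++ (p.2 ++ " "))) d).getD k ""
      = d.getD k "" ++ pvCat ((l.filter (fun p => p.1 == k)).map (fun p => p.2 ++ " ")) := by
  induction l generalizing d with
  | nil => simp [pvCat]
  | cons p t ih =>
    simp only [List.foldl_cons, ih, List.filter_cons]
    by_cases hk : p.1 = k
    · simp [hk, PySem.Dict.getD_insert_self, pvCat, String.append_assoc]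
    · rw [PySem.Dict.getD_insert_of_ne _ _ _ (by simpa using Ne.symm hk)]
      simp [hk]

-- ' '.join(vs) + ' '  equals the concatenation of the (v + ' ') pieces, for nonempty vs
lemma join_space_append (vs : List String) (h : vs ≠ []) :
    PySem.Str.join " " vs ++ " " = pvCat (vs.map (fun v => v ++ " ")) := by
  induction vs with
  | nil => exact absurd rfl h
  | cons v t ih =>
    cases t with
    | nil =>
      apply String.toList_inj.mp
      simp [PySem.Str.toList_join, PySem.Chars.join_singleton, pvCat]
    | cons w r =>
      apply String.toList_inj.mp
      have hih := congrArg String.toList (ih (by simp))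
      simp only [PySem.Str.toList_join, String.toList_append, List.map_cons, pvCat] at hih ⊢
      rw [PySem.Chars.join_cons_cons]
      simp only [List.append_assoc]
      rw [hih]
      simp [List.append_assoc]

-- count characterisation of A's counting fold
lemma count_fold_eq (l : List (String × String)) :
    l.foldl (fun (d : PySem.Dict String Int) p => d.insert p.1 (d.getD p.1 0 + 1)) PySem.Dict.empty
      = PySem.Dict.counter (l.map Prod.fst) := by
  rw [← PySem.Dict.foldl_insert_getD_add_one_eq_counter, List.foldl_map]

-- ===== VERDICT (by name: the statement is the Claim_ definition above) =====
theorem GetTagAppearTimeAndContent_spec : Claim_equal_GetTagAppearTimeAndContent := by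
  intro l _
  show GetTagAppearTimeAndContent l = GetTagAppearTimeAndContent_alt l
  unfold GetTagAppearTimeAndContent GetTagAppearTimeAndContent_alt
  simp only [pair_fold_split l PySem.Dict.empty PySem.Dict.empty rfl, count_fold_eq]
  set G := l.foldl (fun (d : PySem.Dict String (List String)) elem =>
      d.modify elem.1 [] (fun vs => vs ++ [elem.2])) PySem.Dict.empty with hG
  have hkeys : G.keys = PySem.Set.ofList (l.map Prod.fst) := by
    rw [hG, PySem.Dict.keys_foldl_modify_key l Prod.fst [] (fun _ p vs => vs ++ [p.2])]
    simp [PySem.Set.update_nil_left]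
  have hnodup : G.keys.Nodup := by
    rw [hkeys]; exact PySem.Set.nodup_ofList _
  have hgetD : ∀ k, G.getD k [] = (l.filter (fun p => p.1 == k)).map (fun p => p.2) := by
    intro k
    rw [hG, PySem.Dict.getD_foldl_modify_append]
    simp
  have hitems : G.items = G.keys.map (fun k => (k, G.getD k [])) :=
    PySem.Dict.items_eq_map_keys G hnodup []
  simp only [Prod.mk.injEq]
  constructor
  · -- counts
    rw [PySem.Dict.items_counter, hitems, hkeys, List.map_map]
    refine List.map_congr_left (fun k hk => ?_)
    simp only [Function.comp, hgetD]
    congr 1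
    simp only [List.length_map]
    rw [List.count_eq_countP, List.countP_map, List.countP_eq_length_filter]
    rfl
  · -- contents
    have hAC : ∀ k, (l.foldl (fun (d : PySem.Dict String String) p =>
        d.insert p.1 (d.getD p.1 "" ++ (p.2 ++ " "))) PySem.Dict.empty).getD k ""
          = pvCat ((l.filter (fun p => p.1 == k)).map (fun p => p.2 ++ " ")) := by
      intro k
      rw [getD_foldl_insert_strcat]
      simp
    have hCkeys : (l.foldl (fun (d : PySem.Dict String String) p =>
        d.insert p.1 (d.getD p.1 "" ++ (p.2 ++ " "))) PySem.Dict.empty).keys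
          = PySem.Set.ofList (l.map Prod.fst) := by
      rw [PySem.Dict.keys_foldl_insert_key l Prod.fst
            (fun d p => d.getD p.1 "" ++ (p.2 ++ " "))]
      simp [PySem.Set.update_nil_left]
    have hCnodup : (l.foldl (fun (d : PySem.Dict String String) p =>
        d.insert p.1 (d.getD p.1 "" ++ (p.2 ++ " "))) PySem.Dict.empty).keys.Nodup := by
      rw [hCkeys]; exact PySem.Set.nodup_ofList _
    rw [PySem.Dict.items_eq_map_keys _ hCnodup "", hCkeys, hitems, hkeys, List.map_map]
    refine List.map_congr_left (fun k hk => ?_)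
    simp only [Function.comp, hgetD, hAC]
    have hne : (l.filter (fun p => p.1 == k)).map (fun p => p.2) ≠ [] := by
      have : k ∈ l.map Prod.fst := (PySem.Set.mem_ofList _ _).mp hk
      obtain ⟨p, hp, hpe⟩ := List.mem_map.mp this
      simp only [ne_eq, List.map_eq_nil_iff, List.filter_eq_nil_iff, not_forall]
      exact ⟨p, hp, by simp [hpe]⟩
    rw [join_space_append _ hne, List.map_map]
    rfl
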